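-- pv_equiv track=rewrite | github.com/ImDaBigBoss/AdventOfCode-2024 | day17/puzzle2.py | reverse_engineer
-- ===== SOURCE A (Python) =====
-- def reverse_engineer(program: list, value_a: int = None, index_in_prog: int = None) -> int:
--     if index_in_prog == None:
--         index_in_prog = len(program) - 1
--         value_a = 0
--
--     expected_b = program[index_in_prog]
--     value_a = value_a << 3
--
--     # Test solution
--
--     possible_ending_values = [ 0b000, 0b001, 0b010, 0b011, 0b100, 0b101, 0b110, 0b111 ]
--     solutions = []
--
--     for a_end in possible_ending_values:
--         test_a = value_a + a_end
--         a = test_a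
--
--         b = a % 8
--         b = b ^ 1
--         c = a // (2**b)
--         b = b ^ 5
--         a = a // (2**3)
--         b = b ^ c
--
--         if value_a == 0 and a != 0:
--             continue # Skip invalid solutions
--
--         if b % 8 == expected_b:
--             solutions.append(test_a)
--
--     # Branch out to find the correct solution
--     for solution in solutions:
--         if index_in_prog == 0:
--             return solution
--
--         result = reverse_engineer(program, solution, index_in_prog - 1)
--         if result != None:
--             return result
--
--     return None
-- ===== SOURCE B (Python) =====
-- def reverse_engineer(program: list, value_a: int = None, index_in_prog: int = None) -> int:
--     if index_in_prog == None:
--         index_in_prog = len(program) - 1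
--         value_a = 0
--
--     # Breadth-first by program position: keep the whole level of viable register
--     # values in ascending DFS order; the head of the final level is the answer.
--     frontier = [value_a]
--     for idx in range(index_in_prog, -1, -1):
--         expected = program[idx]
--         new_frontier = []
--         for v in frontier:
--             for e in range(8):
--                 t = v * 8 + e
--                 b = (t % 8) ^ 1
--                 if (b ^ 5 ^ (t // (2 ** b))) % 8 == expected:
--                     new_frontier.append(t)
--         frontier = new_frontier
--     return frontier[0] if frontier else None
-- ===== Notes on version B (the rewrite author's own statement) =====
-- stated objective: alternative
-- what changed: The recursive depth-first backtracking search is replaced by an iterative breadth-first level sweep: for each program position from the end down to 0 the whole list of viable register values is rebuilt in ascending order by a nested comprehension-style loop, and the head of the final level is the answer (the dead 'value_a == 0 and a != 0' guard is dropped).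
-- outside the precondition, e.g. on reverse_engineer([99], 1, -1): A returns None, B returns 1
import Mathlib
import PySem

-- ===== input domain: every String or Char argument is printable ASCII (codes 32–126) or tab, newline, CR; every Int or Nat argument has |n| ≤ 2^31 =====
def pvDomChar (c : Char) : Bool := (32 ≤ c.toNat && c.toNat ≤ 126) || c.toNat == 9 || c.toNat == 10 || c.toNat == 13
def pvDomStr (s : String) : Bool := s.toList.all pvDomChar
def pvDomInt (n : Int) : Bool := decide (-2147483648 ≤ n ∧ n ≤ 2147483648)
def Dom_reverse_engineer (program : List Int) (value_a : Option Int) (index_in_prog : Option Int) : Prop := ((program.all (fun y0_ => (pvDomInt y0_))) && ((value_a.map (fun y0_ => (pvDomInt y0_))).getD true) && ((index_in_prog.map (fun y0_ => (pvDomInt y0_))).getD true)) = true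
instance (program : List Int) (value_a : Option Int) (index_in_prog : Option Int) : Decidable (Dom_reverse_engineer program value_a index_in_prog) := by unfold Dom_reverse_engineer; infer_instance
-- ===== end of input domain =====

-- B replaces A's recursive DFS by an iterative breadth-first level sweep (same tree, same order); alternative decomposition, not claimed faster.


-- ===== PORT A =====
-- body of A's candidate loop ('value_a << 3' is ported as 'value_a * 8', exact for all ints;
-- '2**b' with b = (a%8)^1 ∈ [0,7] is ported via b.toNat, exact since b ≥ 0)
def pvSolStep (value_a expected_b : Int) (solutions : List Int) (a_end : Int) : List Int :=
  let test_a := value_a + a_end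
  let a := test_a
  let b := PySem.Int.mod a 8
  let b := PySem.Int.bxor b 1
  let c := PySem.Int.floordiv a (2 ^ b.toNat)
  let b := PySem.Int.bxor b 5
  let a := PySem.Int.floordiv a (2 ^ 3)
  let b := PySem.Int.bxor b c
  if value_a = 0 ∧ a ≠ 0 then solutions
  else if PySem.Int.mod b 8 = expected_b then solutions ++ [test_a] else solutions

def pvSolutions (expected_b value_a : Int) : List Int :=
  (PySem.List.pyRange 0 8 1).foldl (pvSolStep value_a expected_b) []

-- the recursion of A, with the (inside Pre_ nonnegative) index as a Nat
def reverse_engineerGo (program : List Int) : Nat → Int → Option Int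
  | 0, value_a =>
    match PySem.List.pyGet? program ((0 : Nat) : Int) with
    | none => none               -- IndexError: outside Pre_
    | some expected_b => (pvSolutions expected_b (value_a * 8)).head?   -- 'if index_in_prog == 0: return solution' for the first solution
  | (i+1), value_a =>
    match PySem.List.pyGet? program ((i+1 : Nat) : Int) with
    | none => none               -- IndexError: outside Pre_
    | some expected_b =>
      (pvSolutions expected_b (value_a * 8)).findSome? (fun s => reverse_engineerGo program i s)

def reverse_engineer (program : List Int) (value_a : Option Int) (index_in_prog : Option Int) : Option Int :=
  match index_in_prog with
  | none =>
    if program.isEmpty then none -- index_in_prog := -1, program[-1] raises IndexError: outside Pre_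
    else reverse_engineerGo program (program.length - 1) 0
  | some i =>
    match value_a with
    | none => none               -- 'None << 3' raises TypeError: outside Pre_
    | some v =>
      if 0 ≤ i ∧ i < (program.length : Int) then reverse_engineerGo program i.toNat v
      else none                  -- negative/out-of-range explicit index: outside Pre_

-- ===== PORT B =====
-- one value's 8 candidate children, ascending (Source B's inner two loops)
def pvCandOne (expected v e : Int) : Option Int :=
  let t := v * 8 + e
  let b := PySem.Int.bxor (PySem.Int.mod t 8) 1
  if PySem.Int.mod (PySem.Int.bxor (PySem.Int.bxor b 5) (PySem.Int.floordiv t (2 ^ b.toNat))) 8 = expected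
  then some t else none

def pvCand (expected v : Int) : List Int :=
  (PySem.List.pyRange 0 8 1).filterMap (pvCandOne expected v)

-- one iteration of Source B's countdown loop: rebuild the whole frontier
def pvStepB (program : List Int) (idx : Int) (frontier : List Int) : List Int :=
  match PySem.List.pyGet? program idx with
  | none => []                   -- IndexError: outside Pre_
  | some expected => frontier.flatMap (pvCand expected)

def pvRunB (program : List Int) : Nat → List Int → List Int
  | 0, f => pvStepB program ((0 : Nat) : Int) f
  | i+1, f => pvRunB program i (pvStepB program ((i+1 : Nat) : Int) f)

def reverse_engineer_alt (program : List Int) (value_a : Option Int) (index_in_prog : Option Int) : Option Int :=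
  match index_in_prog with
  | none =>
    if program.isEmpty then some 0   -- empty countdown loop: frontier stays [0] (outside Pre_; A raises here)
    else (pvRunB program (program.length - 1) [0]).head?
  | some i =>
    match value_a with
    | none => none                   -- Source B raises TypeError here too: outside Pre_
    | some v =>
      if 0 ≤ i ∧ i < (program.length : Int) then (pvRunB program i.toNat [v]).head?
      else if i < 0 then some v      -- empty countdown loop (outside Pre_; A wraps or raises)
      else none                      -- IndexError: outside Pre_

-- ===== PRECONDITION & SPEC =====
-- Pre_ excludes the inputs where A raises (empty program with defaulted index → IndexError;
-- explicit index with value_a = None → TypeError; index ≥ len → IndexError) and the negative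
-- explicit indices, on which A's value (when it returns one) is an accident of Python's
-- negative-index wraparound.
def Pre_reverse_engineer (program : List Int) (value_a : Option Int) (index_in_prog : Option Int) : Prop :=
  (match index_in_prog with
   | none => !program.isEmpty
   | some i => value_a.isSome && decide (0 ≤ i) && decide (i < (program.length : Int))) = true
instance (program : List Int) (value_a : Option Int) (index_in_prog : Option Int) : Decidable (Pre_reverse_engineer program value_a index_in_prog) := by unfold Pre_reverse_engineer; infer_instance

def pvWitness_reverse_engineer : List Int × Option Int × Option Int := ([2, 4, 1, 7], none, none)

def Spec_reverse_engineer (program : List Int) (value_a : Option Int) (index_in_prog : Option Int) (out : Option Int) : Prop := out = reverse_engineer_alt program value_a index_in_prog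
instance (program : List Int) (value_a : Option Int) (index_in_prog : Option Int) (out : Option Int) : Decidable (Spec_reverse_engineer program value_a index_in_prog out) := by unfold Spec_reverse_engineer; infer_instance

-- ===== CLAIM (what is proved, stated in full; the proofs are below) =====
def Claim_equal_reverse_engineer : Prop := ∀ (program : List Int) (value_a : Option Int) (index_in_prog : Option Int), Dom_reverse_engineer program value_a index_in_prog → Pre_reverse_engineer program value_a index_in_prog → Spec_reverse_engineer program value_a index_in_prog (reverse_engineer program value_a index_in_prog)

-- ===== LEMMAS AND PROOFS =====

-- the skip guard of A is dead code, and its append test is B's membership test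
theorem solstep_eq (v expected e : Int) (acc : List Int)
    (h0 : 0 ≤ e) (h8 : e < 8) :
    pvSolStep (v * 8) expected acc e = acc ++ (pvCandOne expected v e).toList := by
  simp only [pvSolStep, pvCandOne]
  by_cases hg : v * 8 = 0 ∧ PySem.Int.floordiv (v * 8 + e) (2 ^ 3) ≠ 0
  · exfalso
    obtain ⟨hz, hne⟩ := hg
    have hv : v = 0 := by omega
    apply hne
    subst hv
    rw [PySem.Int.floordiv_eq_ediv_of_pos (by norm_num)]
    simp only [zero_mul, zero_add]
    exact Int.ediv_eq_zero_of_lt h0 (by norm_num; omega)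
  · rw [if_neg hg]
    split_ifs with hc
    · simp
    · simp

theorem fold_filterMap (v expected : Int) :
    ∀ (l : List Int), (∀ e ∈ l, 0 ≤ e ∧ e < 8) → ∀ acc,
      l.foldl (pvSolStep (v * 8) expected) acc = acc ++ l.filterMap (pvCandOne expected v) := by
  intro l
  induction l with
  | nil => intro _ acc; simp
  | cons x xs ih =>
    intro hmem acc
    have hx := hmem x (by simp)
    rw [List.foldl_cons, List.filterMap_cons,
        solstep_eq v expected x acc hx.1 hx.2,
        ih (fun e he => hmem e (by simp [he]))]
    cases h : pvCandOne expected v x <;> simp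

theorem cand_eq (expected v : Int) : pvSolutions expected (v * 8) = pvCand expected v := by
  have h8 : PySem.List.pyRange 0 8 1 = [0, 1, 2, 3, 4, 5, 6, 7] := by decide
  rw [pvSolutions, pvCand, h8, fold_filterMap v expected _ (by decide) []]
  rfl

theorem stepB_nil (program : List Int) (idx : Int) : pvStepB program idx [] = [] := by
  cases h : PySem.List.pyGet? program idx <;> simp [pvStepB, h]

theorem stepB_append (program : List Int) (idx : Int) (l1 l2 : List Int) :
    pvStepB program idx (l1 ++ l2) = pvStepB program idx l1 ++ pvStepB program idx l2 := by
  cases h : PySem.List.pyGet? program idx <;> simp [pvStepB, h]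

theorem runB_nil (program : List Int) : ∀ i, pvRunB program i [] = [] := by
  intro i
  induction i with
  | zero => simp [pvRunB, stepB_nil]
  | succ n ih => rw [pvRunB, stepB_nil]; exact ih

theorem runB_append (program : List Int) :
    ∀ i (l1 l2 : List Int), pvRunB program i (l1 ++ l2) = pvRunB program i l1 ++ pvRunB program i l2 := by
  intro i
  induction i with
  | zero => intro l1 l2; simp [pvRunB, stepB_append]
  | succ n ih => intro l1 l2; rw [pvRunB, stepB_append, ih]; rfl

theorem findSome_run (program : List Int) (i : Nat)
    (IH : ∀ v, reverse_engineerGo program i v = (pvRunB program i [v]).head?) :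
    ∀ l : List Int, l.findSome? (reverse_engineerGo program i) = (pvRunB program i l).head? := by
  intro l
  induction l with
  | nil => simp [runB_nil]
  | cons x xs ih =>
    have hx : pvRunB program i (x :: xs) = pvRunB program i [x] ++ pvRunB program i xs := by
      have : x :: xs = [x] ++ xs := rfl
      rw [this, runB_append]
    rw [List.findSome?_cons, hx, List.head?_append, IH x, ih]
    cases h : (pvRunB program i [x]).head? <;> simp

theorem go_eq_run (program : List Int) :
    ∀ (i : Nat) (v : Int), reverse_engineerGo program i v = (pvRunB program i [v]).head? := by
  intro i
  induction i with
  | zero =>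
    intro v
    rw [reverse_engineerGo, pvRunB, pvStepB]
    cases h : PySem.List.pyGet? program ((0 : Nat) : Int) with
    | none => simp
    | some eb => dsimp only; rw [cand_eq]; simp
  | succ n ih =>
    intro v
    rw [reverse_engineerGo, pvRunB, pvStepB]
    cases h : PySem.List.pyGet? program ((n + 1 : Nat) : Int) with
    | none => simp [runB_nil]
    | some eb =>
      dsimp only
      rw [cand_eq, findSome_run program n ih]
      simp

-- ===== VERDICT (by name: the statement is the Claim_ definition above) =====
theorem reverse_engineer_spec : Claim_equal_reverse_engineer := by
  intro program value_a index_in_prog _ hpre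
  unfold Spec_reverse_engineer reverse_engineer reverse_engineer_alt
  unfold Pre_reverse_engineer at hpre
  cases index_in_prog with
  | none =>
    simp only at hpre
    have hne : program.isEmpty = false := by
      cases h : program.isEmpty <;> simp [h] at hpre ⊢
    simp [hne, go_eq_run]
  | some i =>
    cases value_a with
    | none => simp at hpre
    | some v =>
      simp only [Option.isSome_some, Bool.true_and, Bool.and_eq_true, decide_eq_true_eq] at hpre
      dsimp only
      rw [if_pos hpre, if_pos hpre, go_eq_run]
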